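-- pv_equiv track=rewrite | github.com/Safwen707/LEETcode | 3143-longest-unequal-adjacent-groups-subsequence-i/longest-unequal-adjacent-groups-subsequence-i.py | getLongestSubsequence
-- ===== SOURCE A (Python) =====
-- from typing import List
--
-- def getLongestSubsequence(words: List[str], groups: List[int]) -> List[str]:
--     t = len(words)
--     if t == 1:
--         return words
--
--     l = [words[0]]
--
--     for i in range(1, t):
--
--         if groups[i] != groups[i - 1]:
--             l.append(words[i])
--
--     return l
-- ===== SOURCE B (Python) =====
-- from typing import List
-- from itertools import accumulate
--
--
-- def getLongestSubsequence(words: List[str], groups: List[int]) -> List[str]: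
--     # Stage 1: label every index with a run id = prefix count of adjacent label changes.
--     # Stage 2: remember the first word seen for each run id in a dict.
--     # The dict's values, in insertion order, are exactly one word per run.
--     run_ids = accumulate((groups[i] != groups[i - 1] for i in range(1, len(words))),
--                          initial=0)
--     first = {}
--     for rid, word in zip(run_ids, words):
--         first.setdefault(rid, word)
--     return list(first.values())
-- ===== Notes on version B (the rewrite author's own statement) =====
-- stated objective: alternative
-- what changed: Replaces A's single incremental compare-and-append loop by two staged passes: itertools.accumulate labels every index with a run id (prefix count of adjacent group-label changes), then a dict keeps the first word seen per run id and its values are returned.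
import Mathlib
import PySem

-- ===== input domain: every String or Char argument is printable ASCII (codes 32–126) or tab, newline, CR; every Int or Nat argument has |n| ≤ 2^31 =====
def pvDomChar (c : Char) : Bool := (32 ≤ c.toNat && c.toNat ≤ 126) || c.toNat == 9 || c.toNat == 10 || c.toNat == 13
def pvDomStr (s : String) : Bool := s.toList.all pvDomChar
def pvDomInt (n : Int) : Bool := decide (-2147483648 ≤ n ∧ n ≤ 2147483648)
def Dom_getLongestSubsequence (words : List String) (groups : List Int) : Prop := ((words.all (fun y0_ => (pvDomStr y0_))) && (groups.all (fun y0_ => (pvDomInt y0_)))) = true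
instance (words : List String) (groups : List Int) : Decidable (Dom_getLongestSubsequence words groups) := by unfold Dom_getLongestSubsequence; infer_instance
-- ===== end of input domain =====

-- B replaces A's incremental compare-and-append loop by two staged passes: a prefix-sum
-- run-id labelling followed by a first-occurrence dict whose values are returned;
-- objective: alternative, same cost.


-- ===== PORT A =====
def getLongestSubsequence (words : List String) (groups : List Int) : List String :=
  let t : Int := words.length
  if t = 1 then words
  else
    let l : List String := [PySem.List.pyGetD words 0 ""]
    (PySem.List.pyRange 1 t 1).foldl
      (fun l i =>
        if PySem.List.pyGetD groups i 0 ≠ PySem.List.pyGetD groups (i - 1) 0 then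
          l ++ [PySem.List.pyGetD words i ""] else l) l

-- ===== PORT B =====
-- run_ids = accumulate(flags, initial=0) = List.scanl (+) 0 flags; booleans count as 1/0
def getLongestSubsequence_alt (words : List String) (groups : List Int) : List String :=
  let runIds : List Int :=
    List.scanl (· + ·) 0
      ((PySem.List.pyRange 1 (words.length : Int) 1).map
        (fun i => if PySem.List.pyGetD groups i 0 ≠ PySem.List.pyGetD groups (i - 1) 0 then (1 : Int) else 0))
  let first : PySem.Dict Int String :=
    (runIds.zip words).foldl (fun d p => d.setdefault p.1 p.2) PySem.Dict.empty
  first.values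

-- ===== PRECONDITION & SPEC =====
-- Pre_ excludes exactly the inputs where the Python A raises IndexError: empty words
-- (words[0]), and groups shorter than words with len(words) ≥ 2 (groups[i] out of range);
-- when len(words) == 1 A returns without touching groups, so any groups is admitted there.
def Pre_getLongestSubsequence (words : List String) (groups : List Int) : Prop :=
  words ≠ [] ∧ (words.length ≤ groups.length ∨ words.length = 1)
instance (words : List String) (groups : List Int) : Decidable (Pre_getLongestSubsequence words groups) := by unfold Pre_getLongestSubsequence; infer_instance
def pvWitness_getLongestSubsequence : List String × List Int := (["a", "b", "c"], [1, 1, 2])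

def Spec_getLongestSubsequence (words : List String) (groups : List Int) (out : List String) : Prop := out = getLongestSubsequence_alt words groups
instance (words : List String) (groups : List Int) (out : List String) : Decidable (Spec_getLongestSubsequence words groups out) := by unfold Spec_getLongestSubsequence; infer_instance

-- ===== CLAIM (what is proved, stated in full; the proofs are below) =====
def Claim_equal_getLongestSubsequence : Prop := ∀ (words : List String) (groups : List Int), Dom_getLongestSubsequence words groups → Pre_getLongestSubsequence words groups → Spec_getLongestSubsequence words groups (getLongestSubsequence words groups)
-- ===== LEMMAS AND PROOFS =====

-- the words of the tail selected by nonzero flags (one flag per tail word, in sync)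
def selFlags : List Int → List String → List String
  | f :: fs, w :: ws => if f ≠ 0 then w :: selFlags fs ws else selFlags fs ws
  | _, _ => []

-- head word plus the flag-selected tail
def headSel (ws : List String) (fs : List Int) : List String :=
  match ws with
  | [] => []
  | w :: rest => w :: selFlags fs rest

theorem setdefault_eq_insert {d : PySem.Dict Int String} {k : Int} (v : String)
    (h : d.contains k = false) : d.setdefault k v = d.insert k v := by
  apply PySem.Dict.ext
  rw [PySem.Dict.items_insert_of_not_contains d v h]
  simp [PySem.Dict.setdefault, h]

theorem setdefault_of_contains {d : PySem.Dict Int String} {k : Int} (v : String)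
    (h : d.contains k = true) : d.setdefault k v = d := by
  simp [PySem.Dict.setdefault, h]

-- core invariant of B's dict loop over (scanl (+) c fs).zip ws with 0/1 flags
theorem dict_loop_core : ∀ (fs : List Int), (∀ f ∈ fs, f = 0 ∨ f = 1) →
    ∀ (ws : List String) (c : Int) (d : PySem.Dict Int String),
    (((∀ k ∈ d.keys, k ≤ c) → d.contains c = true →
        (((List.scanl (· + ·) c fs).zip ws).foldl (fun d p => d.setdefault p.1 p.2) d).values
          = d.values ++ selFlags fs ws.tail) ∧
     ((∀ k ∈ d.keys, k < c) →
        (((List.scanl (· + ·) c fs).zip ws).foldl (fun d p => d.setdefault p.1 p.2) d).values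
          = d.values ++ headSel ws fs)) := by
  intro fs
  induction fs with
  | nil =>
    intro _ ws c d
    cases ws with
    | nil => simp [List.scanl, headSel, selFlags]
    | cons w rest =>
      constructor
      · intro _ hc
        simp [List.scanl, List.zip, setdefault_of_contains w hc, selFlags]
      · intro hlt
        have hc : d.contains c = false := by
          by_contra h
          have : c ∈ d.keys := (PySem.Dict.contains_iff_mem_keys d c).mp (by
            cases hcc : d.contains c with
            | true => rfl
            | false => exact absurd hcc h)
          exact absurd (hlt c this) (lt_irrefl c)
        simp [List.scanl, List.zip, setdefault_eq_insert w hc, headSel, selFlags,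
          PySem.Dict.values, PySem.Dict.items_insert_of_not_contains d w hc]
  | cons f fs ih =>
    intro h01 ws c d
    have hf : f = 0 ∨ f = 1 := h01 f (List.mem_cons_self ..)
    have h01' : ∀ g ∈ fs, g = 0 ∨ g = 1 := fun g hg => h01 g (List.mem_cons_of_mem f hg)
    cases ws with
    | nil => simp [headSel, selFlags]
    | cons w rest =>
      constructor
      · intro hle hc
        have step : (List.scanl (· + ·) c (f :: fs)).zip (w :: rest)
            = (c, w) :: (List.scanl (· + ·) (c + f) fs).zip rest := by
          simp [List.scanl]
        rw [step, List.foldl_cons]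
        rw [setdefault_of_contains w hc]
        rcases hf with hf0 | hf1
        · subst hf0
          have := (ih h01' rest c d).1
          rw [add_zero] at *
          rw [this hle hc]
          cases rest with
          | nil => simp [selFlags]
          | cons r rs => simp [selFlags]
        · subst hf1
          have := (ih h01' rest (c + 1) d).2
          rw [this (fun k hk => lt_of_le_of_lt (hle k hk) (by omega))]
          cases rest with
          | nil => simp [selFlags, headSel]
          | cons r rs => simp [selFlags, headSel]
      · intro hlt
        have hc : d.contains c = false := by
          by_contra h
          have : c ∈ d.keys := (PySem.Dict.contains_iff_mem_keys d c).mp (by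
            cases hcc : d.contains c with
            | true => rfl
            | false => exact absurd hcc h)
          exact absurd (hlt c this) (lt_irrefl c)
        have step : (List.scanl (· + ·) c (f :: fs)).zip (w :: rest)
            = (c, w) :: (List.scanl (· + ·) (c + f) fs).zip rest := by
          simp [List.scanl]
        rw [step, List.foldl_cons, setdefault_eq_insert w hc]
        have hkeys : ∀ k ∈ (d.insert c w).keys, k ≤ c := by
          intro k hk
          rcases (PySem.Dict.mem_keys_insert d c k w).mp hk with h | h
          · omega
          · exact le_of_lt (hlt k h)
        have hvins : (d.insert c w).values = d.values ++ [w] := by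
          simp [PySem.Dict.values, PySem.Dict.items_insert_of_not_contains d w hc]
        rcases hf with hf0 | hf1
        · subst hf0
          have hcin : (d.insert c w).contains c = true := PySem.Dict.contains_insert_self d c w
          have := (ih h01' rest c (d.insert c w)).1
          rw [add_zero] at *
          rw [this hkeys hcin, hvins]
          cases rest with
          | nil => simp [selFlags, headSel]
          | cons r rs => simp [selFlags, headSel]
        · subst hf1
          have := (ih h01' rest (c + 1) (d.insert c w)).2
          rw [this (fun k hk => lt_of_le_of_lt (hkeys k hk) (by omega)), hvins]
          cases rest with
          | nil => simp [selFlags, headSel]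
          | cons r rs => simp [selFlags, headSel]

-- selFlags of 0/1-encoded flags over matching maps is filter-then-map
theorem selFlags_map (p : Int → Bool) (wf : Int → String) :
    ∀ (l : List Int),
      selFlags (l.map (fun i => if p i then (1 : Int) else 0)) (l.map wf)
        = (l.filter p).map wf := by
  intro l
  induction l with
  | nil => simp [selFlags]
  | cons i l ih =>
    by_cases hp : p i <;> simp [selFlags, hp, ih]

-- ===== VERDICT (by name: the statement is the Claim_ definition above) =====
theorem getLongestSubsequence_spec : Claim_equal_getLongestSubsequence := by
  intro words groups _ hpre
  obtain ⟨hne, -⟩ := hpre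
  have hn : 0 < words.length := List.length_pos_of_ne_nil hne
  set p : Int → Bool := fun i =>
    decide (PySem.List.pyGetD groups i 0 ≠ PySem.List.pyGetD groups (i - 1) 0) with hp
  set wf : Int → String := fun i => PySem.List.pyGetD words i "" with hwf
  set flags : List Int :=
    (PySem.List.pyRange 1 (words.length : Int) 1).map (fun i => if p i then (1 : Int) else 0)
    with hflags
  -- B's value via the dict-loop invariant
  have hB : getLongestSubsequence_alt words groups = headSel words flags := by
    unfold getLongestSubsequence_alt
    have h01 : ∀ f ∈ flags, f = 0 ∨ f = 1 := by
      intro f hf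
      rw [hflags] at hf
      rcases List.mem_map.mp hf with ⟨i, -, rfl⟩
      by_cases hpi : p i <;> simp [hpi]
    have := (dict_loop_core flags h01 words 0 PySem.Dict.empty).2
      (by simp [PySem.Dict.keys_empty])
    simpa [hflags, hp, hwf, PySem.Dict.values, PySem.Dict.empty] using this
  -- words as a map over pyRange 0 n
  have hwords : words = wf 0 :: (PySem.List.pyRange 1 (words.length : Int) 1).map wf := by
    have h0 := PySem.List.map_pyGetD_pyRange_zero words ""
    simp only [PySem.List.len] at h0
    rw [PySem.List.pyRange_one_cons (by exact_mod_cast hn : (0:Int) < (words.length : Int))] at h0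
    simpa [hwf] using h0.symm
  have hsel : headSel words flags
      = wf 0 :: ((PySem.List.pyRange 1 (words.length : Int) 1).filter p).map wf := by
    conv_lhs => rw [hwords]
    simp only [headSel]
    rw [hflags, selFlags_map p wf]
  show Spec_getLongestSubsequence words groups (getLongestSubsequence words groups)
  unfold Spec_getLongestSubsequence getLongestSubsequence
  rw [hB, hsel]
  by_cases ht1 : (words.length : Int) = 1
  · simp only [ht1, if_pos]
    obtain ⟨a, rfl⟩ := List.length_eq_one_iff.mp (by exact_mod_cast ht1)
    rw [PySem.List.pyRange_one_eq_nil le_rfl]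
    simp [hwf, PySem.List.pyGetD]
  · simp only [if_neg ht1]
    have hfold := PySem.List.foldl_append_if p wf
      (PySem.List.pyRange 1 (words.length : Int) 1) [wf 0]
    simpa [hp, hwf] using hfold
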